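-- pv_equiv track=rewrite | github.com/obeleh/codur | codur/tools/rope_tools.py | _extract_identifier
-- ===== SOURCE A (Python) =====
-- from typing import Optional
--
-- def _extract_identifier(content: str, offset: int) -> Optional[str]:
--     """Extract a Python identifier surrounding an offset."""
--     if not content:
--         return None
--     if offset >= len(content):
--         offset = len(content) - 1
--     if offset < 0:
--         return None
--
--     if not _is_identifier_char(content[offset]) and offset > 0:
--         if _is_identifier_char(content[offset - 1]):
--             offset -= 1
--
--     if not _is_identifier_char(content[offset]):
--         return None
--
--     start = offset
--     while start > 0 and _is_identifier_char(content[start - 1]):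
--         start -= 1
--     end = offset + 1
--     while end < len(content) and _is_identifier_char(content[end]):
--         end += 1
--     if not (content[start].isalpha() or content[start] == "_"):
--         return None
--     return content[start:end]
--
-- def _is_identifier_char(char: str) -> bool:
--     """Return True if a character is valid in a Python identifier."""
--     return char.isalnum() or char == "_"
-- ===== SOURCE B (Python) =====
-- from typing import Optional
--
-- def _extract_identifier(content: str, offset: int) -> Optional[str]:
--     """Extract a Python identifier surrounding an offset (single forward scan)."""
--     if not content:
--         return None
--     n = len(content)
--     if offset >= n:
--         offset = n - 1
--     if offset < 0:
--         return None
--     if not _idc(content[offset]) and offset > 0 and _idc(content[offset - 1]):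
--         offset -= 1
--     # One forward pass over maximal runs of identifier chars; `start` is the
--     # start of the currently open run, or None.
--     start = None
--     for i, ch in enumerate(content):
--         if _idc(ch):
--             if start is None:
--                 start = i
--         else:
--             if start is not None and start <= offset < i:
--                 return _word(content, start, i)
--             if i >= offset:
--                 return None
--             start = None
--     if start is not None and start <= offset:
--         return _word(content, start, n)
--     return None
--
-- def _word(content: str, start: int, end: int) -> Optional[str]:
--     w = content[start:end]
--     return w if (w[0].isalpha() or w[0] == "_") else None
--
-- def _idc(ch: str) -> bool:
--     return ch.isalnum() or ch == "_"
-- ===== Notes on version B (the rewrite author's own statement) =====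
-- stated objective: alternative
-- what changed: B replaces A's backward/forward while-loops around the offset with a single forward scan over maximal identifier-character runs, returning the run whose span contains the (adjusted) offset.
import Mathlib
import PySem

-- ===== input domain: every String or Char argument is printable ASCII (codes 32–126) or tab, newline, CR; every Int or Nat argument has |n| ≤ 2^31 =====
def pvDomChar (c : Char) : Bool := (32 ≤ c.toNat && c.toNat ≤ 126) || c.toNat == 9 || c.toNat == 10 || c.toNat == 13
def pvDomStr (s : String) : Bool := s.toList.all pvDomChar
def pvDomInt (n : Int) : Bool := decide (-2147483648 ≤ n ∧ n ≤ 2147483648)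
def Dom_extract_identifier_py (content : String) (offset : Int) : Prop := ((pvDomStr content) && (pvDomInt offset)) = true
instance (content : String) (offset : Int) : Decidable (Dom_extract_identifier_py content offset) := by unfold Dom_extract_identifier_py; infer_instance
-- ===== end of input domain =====

-- B replaces A's backward/forward while-loops around the offset by one forward scan over
-- maximal identifier-character runs (objective: alternative; same O(n) cost).

-- ===== PORT A =====
-- _is_identifier_char
def pvIdc (c : Char) : Bool := PySem.Chars.isalnum c || c == '_'

-- while start > 0 and _is_identifier_char(content[start - 1]): start -= 1
def pvLeftA (cs : List Char) : Nat → Nat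
  | 0 => 0
  | s + 1 => if pvIdc (cs.getD s ' ') then pvLeftA cs s else s + 1

-- while end < len(content) and _is_identifier_char(content[end]): end += 1
def pvRightA (cs : List Char) (e : Nat) : Nat :=
  if h : e < cs.length then
    (if pvIdc (cs.getD e ' ') then pvRightA cs (e + 1) else e)
  else e
termination_by cs.length - e

def extract_identifier_py (content : String) (offset : Int) : Option String :=
  let cs := content.toList
  if cs.length = 0 then none else
  let offset1 : Int := if (cs.length : Int) ≤ offset then (cs.length : Int) - 1 else offset
  if offset1 < 0 then none else
  let o0 := offset1.toNat
  let o := if ¬ pvIdc (cs.getD o0 ' ') = true ∧ 0 < o0 then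
             (if pvIdc (cs.getD (o0 - 1) ' ') then o0 - 1 else o0) else o0
  if ¬ pvIdc (cs.getD o ' ') = true then none else
  let s := pvLeftA cs o
  let e := pvRightA cs (o + 1)
  let c0 := cs.getD s ' '
  if ¬ (PySem.Chars.isalpha c0 || c0 == '_') = true then none
  else some (String.ofList (PySem.List.slice cs (some (s : Int)) (some (e : Int))))

-- ===== PORT B =====
-- _word(content, start, end): the slice is nonempty at every call site, so the [] arm is unreachable
def pvWordB (cs : List Char) (s e : Nat) : Option String :=
  let w := PySem.List.slice cs (some (s : Int)) (some (e : Int))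
  match w with
  | [] => none
  | c :: _ => if PySem.Chars.isalpha c || c == '_' then some (String.ofList w) else none

-- the `for i, ch in enumerate(content)` loop carrying `start` (the open run), with its tail case
def pvScanB (cs : List Char) (o : Nat) : List Char → Nat → Option Nat → Option String
  | [], _, st =>
    match st with
    | some s => if s ≤ o then pvWordB cs s cs.length else none
    | none => none
  | c :: rest, i, st =>
    if pvIdc c then
      pvScanB cs o rest (i + 1) (some (st.getD i))
    else
      match st with
      | some s =>
        if s ≤ o ∧ o < i then pvWordB cs s i
        else if o ≤ i then none
        else pvScanB cs o rest (i + 1) none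
      | none =>
        if o ≤ i then none else pvScanB cs o rest (i + 1) none

def extract_identifier_py_alt (content : String) (offset : Int) : Option String :=
  let cs := content.toList
  if cs.length = 0 then none else
  let offset1 : Int := if (cs.length : Int) ≤ offset then (cs.length : Int) - 1 else offset
  if offset1 < 0 then none else
  let o0 := offset1.toNat
  let o := if ¬ pvIdc (cs.getD o0 ' ') = true ∧ 0 < o0 then
             (if pvIdc (cs.getD (o0 - 1) ' ') then o0 - 1 else o0) else o0
  pvScanB cs o cs 0 none

-- ===== PRECONDITION & SPEC =====
def Spec_extract_identifier_py (content : String) (offset : Int) (out : Option String) : Prop := out = extract_identifier_py_alt content offset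
instance (content : String) (offset : Int) (out : Option String) : Decidable (Spec_extract_identifier_py content offset out) := by unfold Spec_extract_identifier_py; infer_instance

-- ===== CLAIM (what is proved, stated in full; the proofs are below) =====
def Claim_equal_extract_identifier_py : Prop := ∀ (content : String) (offset : Int), Dom_extract_identifier_py content offset → Spec_extract_identifier_py content offset (extract_identifier_py content offset)

-- ===== LEMMAS AND PROOFS =====

-- A's answer after the offset adjustment, as a single expression
def pvAns (cs : List Char) (o : Nat) : Option String :=
  if pvIdc (cs.getD o ' ') = true then pvWordB cs (pvLeftA cs o) (pvRightA cs (o + 1)) else none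

lemma pvLeftA_le (cs : List Char) (o : Nat) : pvLeftA cs o ≤ o := by
  induction o with
  | zero => simp [pvLeftA]
  | succ k ih =>
    unfold pvLeftA
    split
    · omega
    · omega

lemma pvLeftA_eq (cs : List Char) (s o : Nat) (hso : s ≤ o)
    (hrun : ∀ j, s ≤ j → j < o → pvIdc (cs.getD j ' ') = true)
    (hmax : s = 0 ∨ pvIdc (cs.getD (s - 1) ' ') = false) :
    pvLeftA cs o = s := by
  induction o with
  | zero => interval_cases s <;> simp [pvLeftA]
  | succ k ih =>
    by_cases hs : s = k + 1
    · subst hs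
      rcases hmax with h0 | hm
      · omega
      · simp at hm ⊢
        unfold pvLeftA
        simp [hm]
    · have hsk : s ≤ k := by omega
      have hk : pvIdc (cs.getD k ' ') = true := hrun k hsk (by omega)
      unfold pvLeftA
      rw [if_pos hk]
      exact ih hsk (fun j hj hjk => hrun j hj (by omega))

lemma pvRightA_of_ge (cs : List Char) (i : Nat) (h : cs.length ≤ i) : pvRightA cs i = i := by
  rw [pvRightA]
  simp [Nat.not_lt_of_ge h]

lemma pvRightA_step (cs : List Char) (i : Nat) (hi : i < cs.length)
    (hid : pvIdc (cs.getD i ' ') = true) : pvRightA cs i = pvRightA cs (i + 1) := by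
  rw [pvRightA]
  rw [dif_pos hi, if_pos hid]

lemma pvRightA_stop (cs : List Char) (i : Nat)
    (hid : pvIdc (cs.getD i ' ') = false) : pvRightA cs i = i := by
  rw [pvRightA]
  split
  · rw [if_neg (by rw [hid]; simp)]
  · rfl

lemma pvWordB_clamp (cs : List Char) (s i : Nat) (h : cs.length ≤ i) :
    pvWordB cs s cs.length = pvWordB cs s i := by
  unfold pvWordB
  have h1 : PySem.List.slice cs (some (s : Int)) (some (cs.length : Int)) = cs.drop s := by
    simp [PySem.List.slice_natCast]
  have h2 : PySem.List.slice cs (some (s : Int)) (some (i : Int)) = cs.drop s := by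
    simp [PySem.List.slice_natCast]
    omega
  rw [h1, h2]

lemma scan_phase2 (cs : List Char) (o : Nat) :
    ∀ (l : List Char) (i s : Nat), l = cs.drop i → o < i → s ≤ o →
    pvScanB cs o l i (some s) = pvWordB cs s (pvRightA cs i) := by
  intro l
  induction l with
  | nil =>
    intro i s hl hoi hso
    have hlen : cs.length ≤ i := by
      by_contra h
      have := List.drop_eq_nil_iff.mp hl.symm
      omega
    rw [pvRightA_of_ge cs i hlen]
    simp [pvScanB, hso, pvWordB_clamp cs s i hlen]
  | cons c rest ih =>
    intro i s hl hoi hso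
    have hdrop : cs.drop i = c :: rest := hl.symm
    have hi : i < cs.length := by
      by_contra h
      rw [List.drop_eq_nil_iff.mpr (by omega)] at hdrop
      exact List.cons_ne_nil _ _ hdrop.symm
    have hc : c = cs.getD i ' ' := by
      have h0 : (cs.drop i).getD 0 ' ' = c := by rw [hdrop]; rfl
      rw [List.getD, List.getElem?_drop] at h0
      simpa [List.getD] using h0.symm
    have hrest : rest = cs.drop (i + 1) := by
      rw [← List.tail_drop, hdrop]; rfl
    by_cases hid : pvIdc c = true
    · rw [pvScanB]
      simp only [hid, if_pos, Option.getD_some]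
      rw [ih (i + 1) s hrest (by omega) hso, hc] at *
      rw [pvRightA_step cs i hi (hc ▸ hid)]
    · rw [pvScanB]
      simp only [hid]
      rw [if_neg (by simp [hid])]
      rw [if_pos ⟨hso, hoi⟩]
      rw [hc] at hid
      rw [pvRightA_stop cs i (by simpa using hid)]
  
-- invariant of the scan state before the offset has been passed
def pvInv (cs : List Char) (i : Nat) (st : Option Nat) : Prop :=
  match st with
  | none => i = 0 ∨ pvIdc (cs.getD (i - 1) ' ') = false
  | some s => s < i ∧ (∀ j, s ≤ j → j < i → pvIdc (cs.getD j ' ') = true) ∧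
      (s = 0 ∨ pvIdc (cs.getD (s - 1) ' ') = false)

lemma scan_phase1 (cs : List Char) (o : Nat) (holen : o < cs.length) :
    ∀ (l : List Char) (i : Nat) (st : Option Nat), l = cs.drop i → i ≤ o →
    pvInv cs i st →
    pvScanB cs o l i st = pvAns cs o := by
  intro l
  induction l with
  | nil =>
    intro i st hl hio _
    exfalso
    have := List.drop_eq_nil_iff.mp hl.symm
    omega
  | cons c rest ih =>
    intro i st hl hio hinv
    have hdrop : cs.drop i = c :: rest := hl.symm
    have hi : i < cs.length := by omega
    have hc : c = cs.getD i ' ' := by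
      have h0 : (cs.drop i).getD 0 ' ' = c := by rw [hdrop]; rfl
      rw [List.getD, List.getElem?_drop] at h0
      simpa [List.getD] using h0.symm
    have hrest : rest = cs.drop (i + 1) := by
      rw [← List.tail_drop, hdrop]; rfl
    cases st with
    | none =>
      by_cases hid : pvIdc c = true
      · rw [pvScanB, if_pos hid]
        simp only [Option.getD_none]
        by_cases hio' : i = o
        · subst hio'
          rw [scan_phase2 cs i rest (i + 1) i hrest (by omega) (le_refl i)]
          have hL : pvLeftA cs i = i :=
            pvLeftA_eq cs i i (le_refl _) (fun j h1 h2 => by omega) hinv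
          rw [pvAns, if_pos (hc ▸ hid), hL]
        · apply ih (i + 1) (some i) hrest (by omega)
          refine ⟨by omega, ?_, by simpa using hinv⟩
          intro j h1 h2
          have : j = i := by omega
          rw [this, ← hc]; exact hid
      · rw [pvScanB, if_neg hid]
        by_cases hio' : i = o
        · subst hio'
          rw [if_pos (le_refl i), pvAns, if_neg (by rw [← hc]; simpa using hid)]
        · rw [if_neg (by omega)]
          apply ih (i + 1) none hrest (by omega)
          right
          rw [show i + 1 - 1 = i by omega, ← hc]
          simpa using hid
    | some s =>
      obtain ⟨h1, h2, h3⟩ := hinv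
      by_cases hid : pvIdc c = true
      · rw [pvScanB, if_pos hid]
        simp only [Option.getD_some]
        by_cases hio' : i = o
        · subst hio'
          rw [scan_phase2 cs i rest (i + 1) s hrest (by omega) (by omega)]
          have hL : pvLeftA cs i = s := pvLeftA_eq cs s i (by omega) h2 h3
          rw [pvAns, if_pos (hc ▸ hid), hL]
        · apply ih (i + 1) (some s) hrest (by omega)
          refine ⟨by omega, ?_, h3⟩
          intro j hj1 hj2
          by_cases hji : j = i
          · rw [hji, ← hc]; exact hid
          · exact h2 j hj1 (by omega)
      · rw [pvScanB, if_neg hid, if_neg (by omega)]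
        by_cases hio' : i = o
        · subst hio'
          rw [if_pos (le_refl i), pvAns, if_neg (by rw [← hc]; simpa using hid)]
        · rw [if_neg (by omega)]
          apply ih (i + 1) none hrest (by omega)
          right
          rw [show i + 1 - 1 = i by omega, ← hc]
          simpa using hid

lemma scan_main (cs : List Char) (o : Nat) (holen : o < cs.length) :
    pvScanB cs o cs 0 none = pvAns cs o :=
  scan_phase1 cs o holen cs 0 none (by simp) (by omega) (Or.inl rfl)

lemma pvRightA_ge (cs : List Char) (e : Nat) : e ≤ pvRightA cs e := by
  fun_induction pvRightA with
  | case1 e h hid ih => omega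
  | case2 e h hid => omega
  | case3 e h => omega

lemma pvWordB_eq (cs : List Char) (s e : Nat) (hs : s < cs.length) (hse : s < e) :
    pvWordB cs s e =
      if ¬ (PySem.Chars.isalpha (cs.getD s ' ') || cs.getD s ' ' == '_') = true then none
      else some (String.ofList (PySem.List.slice cs (some (s : Int)) (some (e : Int)))) := by
  unfold pvWordB
  have hw : PySem.List.slice cs (some (s : Int)) (some (e : Int)) =
      cs.getD s ' ' :: ((cs.drop (s + 1)).take (e - s - 1)) := by
    simp only [PySem.List.slice_natCast]
    rw [List.drop_eq_getElem_cons hs]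
    have : e - s = (e - s - 1) + 1 := by omega
    rw [this, List.take_succ_cons, List.getD_eq_getElem cs ' ' hs]
    simp
  have hgd : cs.getD s ' ' = cs[s] := List.getD_eq_getElem cs ' ' hs
  have hgs : cs[s]?.getD ' ' = cs[s] := by rw [List.getElem?_eq_getElem hs]; rfl
  rw [hgd, hw]
  cases hca : (PySem.Chars.isalpha cs[s] || cs[s] == '_') <;> simp [hca, hgs]

-- ===== VERDICT (by name: the statement is the Claim_ definition above) =====
theorem extract_identifier_py_spec : Claim_equal_extract_identifier_py := by
  intro content offset _
  unfold Spec_extract_identifier_py extract_identifier_py extract_identifier_py_alt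
  set cs := content.toList with hcs
  by_cases h0 : cs.length = 0
  · simp [h0]
  rw [if_neg h0, if_neg h0]
  set offset1 : Int := if (cs.length : Int) ≤ offset then (cs.length : Int) - 1 else offset with hoff1
  by_cases hneg : offset1 < 0
  · rw [if_pos hneg, if_pos hneg]
  rw [if_neg hneg, if_neg hneg]
  set o0 := offset1.toNat with ho0
  have ho0len : o0 < cs.length := by
    rw [ho0, hoff1]
    split
    · omega
    · omega
  set o := if ¬ pvIdc (cs.getD o0 ' ') = true ∧ 0 < o0 then
             (if pvIdc (cs.getD (o0 - 1) ' ') then o0 - 1 else o0) else o0 with ho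
  have holen : o < cs.length := by
    rw [ho]
    split
    · split <;> omega
    · omega
  rw [scan_main cs o holen]
  by_cases hid : pvIdc (cs.getD o ' ') = true
  · rw [if_neg (fun h => h hid), pvAns, if_pos hid]
    have hsle : pvLeftA cs o ≤ o := pvLeftA_le cs o
    have hege : o + 1 ≤ pvRightA cs (o + 1) := pvRightA_ge cs (o + 1)
    rw [pvWordB_eq cs (pvLeftA cs o) (pvRightA cs (o + 1)) (by omega) (by omega)]
  · rw [if_pos hid, pvAns, if_neg hid]
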